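-- pv_equiv track=rewrite | github.com/Junsu0213/codetree-TILs | 240612/고대 문명 유적 탐사/ancient-ruin-exploration.py | u_acq
-- ===== SOURCE A (Python) =====
-- import copy
-- from collections import deque
--
-- def u_acq(map_list, visited):
--     dy = [1, -1, 0, 0]
--     dx = [0, 0, 1, -1]
--     qq = deque()
--
--     total_stack = 0
--     total_visited = copy.deepcopy(visited)
--
--     for row in range(5):
--         for col in range(5):
--
--             if total_visited[row][col] == False:
--                 qq.append([row, col])
--
--             visited_ = [[False]*5 for _ in range(5)]
--             stack = 1
--             idx = map_list[row][col]
--             visited_[row][col] = True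
--
--             while qq:
--                 y_, x_ = qq.popleft()
--
--                 for ii in range(4):
--                     dy_ = y_ + dy[ii]
--                     dx_ = x_ + dx[ii]
--
--                     if 0 <= dy_ < 5 and 0 <= dx_ < 5 and idx == map_list[dy_][dx_] and visited_[dy_][dx_] == False:
--                         stack += 1
--                         visited_[dy_][dx_] = True
--                         qq.append([dy_, dx_])
--
--             if stack >= 3:
--                 total_stack += stack
--                 for row_ in range(5):
--                     for col_ in range(5):
--                         if visited_[row_][col_] == True:
--                             total_visited[row_][col_] = True
--     return total_stack, total_visited
-- ===== SOURCE B (Python) =====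
-- # Alternative algorithm: instead of A's incremental BFS with a shared deque, compute
-- # each cell's equal-value connected component by whole-grid fixpoint saturation,
-- # then select each component once (at its first not-yet-visited cell in scan order).
-- # Only the return value matters; neither implementation mutates its arguments.
-- def u_acq(map_list, visited):
--     dirs = ((1, 0), (-1, 0), (0, 1), (0, -1))
--
--     def comp(r, c):
--         v = map_list[r][c]
--         s = {(r, c)}
--         for _ in range(25):
--             s = {(y, x) for y in range(5) for x in range(5)
--                  if (y, x) in s
--                  or (map_list[y][x] == v and any((y + a, x + b) in s for (a, b) in dirs))}
--         return s
--
--     comps = [[comp(r, c) for c in range(5)] for r in range(5)]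
--
--     def selected(s):
--         return len(s) >= 3 and any(not visited[y][x] for (y, x) in s)
--
--     def first_new(s):
--         return next((y, x) for y in range(5) for x in range(5)
--                     if (y, x) in s and not visited[y][x])
--
--     total = sum(len(comps[r][c]) for r in range(5) for c in range(5)
--                 if selected(comps[r][c]) and (r, c) == first_new(comps[r][c]))
--
--     out = [list(row) for row in visited]
--     for r in range(5):
--         for c in range(5):
--             if selected(comps[r][c]):
--                 out[r][c] = True
--     return total, out
-- ===== Notes on version B (the rewrite author's own statement) =====
-- stated objective: alternative
-- what changed: A runs an incremental BFS with a deque shared across the 25-cell scan, marking a running total_visited as it goes; B instead computes each cell's equal-value connected component by whole-grid fixpoint saturation and then selects each component once (at its first not-yet-visited cell in scan order), summing sizes and painting the output in one stateless pass.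
import Mathlib
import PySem

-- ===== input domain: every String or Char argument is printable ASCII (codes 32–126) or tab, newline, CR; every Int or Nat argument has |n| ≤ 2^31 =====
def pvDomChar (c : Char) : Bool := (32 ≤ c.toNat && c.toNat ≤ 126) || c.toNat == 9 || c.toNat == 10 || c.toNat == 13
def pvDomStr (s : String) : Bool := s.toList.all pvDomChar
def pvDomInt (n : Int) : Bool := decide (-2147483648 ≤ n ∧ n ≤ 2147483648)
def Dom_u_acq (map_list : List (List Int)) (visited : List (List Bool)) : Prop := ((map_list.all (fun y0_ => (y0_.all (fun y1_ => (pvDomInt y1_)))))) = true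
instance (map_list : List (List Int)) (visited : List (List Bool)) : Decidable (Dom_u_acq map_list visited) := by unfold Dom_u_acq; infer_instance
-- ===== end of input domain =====

-- B changes the algorithm (fixpoint saturation of whole components instead of A's
-- incremental BFS with a shared deque); same return value, neither mutates its arguments.

-- shared low-level grid accessors (Python m[y][x] reads / writes, used by both ports;
-- exact under Pre_, which guarantees every such access is in range)
def gI (m : List (List Int)) (y x : Int) : Int := (m.getD y.toNat []).getD x.toNat 0
def gB (m : List (List Bool)) (y x : Int) : Bool := (m.getD y.toNat []).getD x.toNat false
def sB (m : List (List Bool)) (y x : Int) (b : Bool) : List (List Bool) :=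
  m.set y.toNat ((m.getD y.toNat []).set x.toNat b)
-- scan order 'for row in range(5): for col in range(5)'
def pvCells : List (Int × Int) :=
  (List.range 5).flatMap (fun (r : Nat) => (List.range 5).map (fun (c : Nat) => ((r : Int), (c : Int))))

-- ===== PORT A =====
def pvDy : List Int := [1, -1, 0, 0]
def pvDx : List Int := [0, 0, 1, -1]

-- body of 'for ii in range(4)' on state (qq, visited_, stack)
def bfsStep (map_list : List (List Int)) (idx y x : Int)
    (st : List (Int × Int) × List (List Bool) × Int) (ii : Nat) :
    List (Int × Int) × List (List Bool) × Int :=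
  let dy_ := y + pvDy.getD ii 0
  let dx_ := x + pvDx.getD ii 0
  if 0 ≤ dy_ ∧ dy_ < 5 ∧ 0 ≤ dx_ ∧ dx_ < 5 ∧ idx = gI map_list dy_ dx_ ∧ gB st.2.1 dy_ dx_ = false
  then (st.1 ++ [(dy_, dx_)], sB st.2.1 dy_ dx_ true, st.2.2 + 1)
  else st

-- 'while qq:' — fuel is only a totality guard (the loop provably ends in < 1000 rounds)
def bfsLoop (map_list : List (List Int)) (idx : Int) :
    Nat → List (Int × Int) → List (List Bool) → Int → List (Int × Int) × List (List Bool) × Int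
  | 0, qq, v, stack => (qq, v, stack)
  | _ + 1, [], v, stack => ([], v, stack)
  | fuel + 1, (y, x) :: rest, v, stack =>
    let st := [0, 1, 2, 3].foldl (bfsStep map_list idx y x) (rest, v, stack)
    bfsLoop map_list idx fuel st.1 st.2.1 st.2.2

-- body of the outer 'for col' iteration on state (qq, total_stack, total_visited)
def uOuter (map_list : List (List Int)) (st : List (Int × Int) × Int × List (List Bool))
    (p : Int × Int) : List (Int × Int) × Int × List (List Bool) :=
  let qq := if gB st.2.2 p.1 p.2 = false then st.1 ++ [p] else st.1
  let v0 := sB (List.replicate 5 (List.replicate 5 false)) p.1 p.2 true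
  let idx := gI map_list p.1 p.2
  let r := bfsLoop map_list idx 1000 qq v0 1
  if 3 ≤ r.2.2 then
    (r.1, st.2.1 + r.2.2,
      pvCells.foldl (fun tv q => if gB r.2.1 q.1 q.2 = true then sB tv q.1 q.2 true else tv) st.2.2)
  else (r.1, st.2.1, st.2.2)

def u_acq (map_list : List (List Int)) (visited : List (List Bool)) : Int × List (List Bool) :=
  -- deepcopy of an immutable value = itself
  let fin := pvCells.foldl (uOuter map_list) ([], 0, visited) 
  (fin.2.1, fin.2.2)

-- ===== PORT B =====
def pvDirs : List (Int × Int) := [(1, 0), (-1, 0), (0, 1), (0, -1)]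

-- the set comprehension of Source B's comp: one saturation round (enumerates the grid in
-- range order, so the built set is exactly this filtered list)
def compGrow (map_list : List (List Int)) (v : Int) (s : List (Int × Int)) : List (Int × Int) :=
  pvCells.filter (fun p =>
    s.contains p || (gI map_list p.1 p.2 == v && pvDirs.any (fun d => s.contains (p.1 + d.1, p.2 + d.2))))

def compB (map_list : List (List Int)) (r c : Int) : List (Int × Int) :=
  let v := gI map_list r c
  (List.range 25).foldl (fun s _ => PySem.Set.ofList (compGrow map_list v s)) [(r, c)]

def selB (visited : List (List Bool)) (s : List (Int × Int)) : Bool :=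
  decide (3 ≤ s.length) && s.any (fun p => !gB visited p.1 p.2)

def firstNewB (visited : List (List Bool)) (s : List (Int × Int)) : Option (Int × Int) :=
  pvCells.find? (fun p => s.contains p && !gB visited p.1 p.2)

def compsB (map_list : List (List Int)) : List (List (List (Int × Int))) :=
  (List.range 5).map (fun (r : Nat) => (List.range 5).map (fun (c : Nat) => compB map_list (r : Int) (c : Int)))

-- comps[r][c] lookup
def getCB (map_list : List (List Int)) (p : Int × Int) : List (Int × Int) :=
  ((compsB map_list).getD p.1.toNat []).getD p.2.toNat []

def u_acq_alt (map_list : List (List Int)) (visited : List (List Bool)) : Int × List (List Bool) :=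
  let total := pvCells.foldl (fun (t : Int) p =>
    if selB visited (getCB map_list p) && (firstNewB visited (getCB map_list p) == some p)
    then t + ((getCB map_list p).length : Int) else t) 0
  -- '[list(row) for row in visited]' copies an immutable value: identity here
  let out := pvCells.foldl (fun mm p =>
    if selB visited (getCB map_list p) then sB mm p.1 p.2 true else mm) visited
  (total, out)

-- ===== PRECONDITION & SPEC =====
-- Pre_: exactly the inputs where every index access of A is in range (A raises IndexError
-- otherwise): both grids have at least 5 rows whose first five rows have length at least 5.
def Pre_u_acq (map_list : List (List Int)) (visited : List (List Bool)) : Prop :=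
  5 ≤ map_list.length ∧ (∀ r ∈ List.range 5, 5 ≤ (map_list.getD r []).length) ∧
  5 ≤ visited.length ∧ (∀ r ∈ List.range 5, 5 ≤ (visited.getD r []).length)
instance (map_list : List (List Int)) (visited : List (List Bool)) : Decidable (Pre_u_acq map_list visited) := by unfold Pre_u_acq; infer_instance

def pvWitness_u_acq : List (List Int) × List (List Bool) :=
  ([[1,1,1,0,0],[0,2,0,0,0],[0,2,0,0,0],[0,2,0,0,0],[0,0,0,0,0]],
   [[false,false,false,false,false],[false,false,false,false,false],[false,false,false,false,false],
    [false,false,false,false,false],[false,true,false,false,false]])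

def Spec_u_acq (map_list : List (List Int)) (visited : List (List Bool)) (out : Int × List (List Bool)) : Prop := out = u_acq_alt map_list visited
instance (map_list : List (List Int)) (visited : List (List Bool)) (out : Int × List (List Bool)) : Decidable (Spec_u_acq map_list visited out) := by unfold Spec_u_acq; infer_instance

-- ===== CLAIM (what is proved, stated in full; the proofs are below) =====
def Claim_equal_u_acq : Prop := ∀ (map_list : List (List Int)) (visited : List (List Bool)), Dom_u_acq map_list visited → Pre_u_acq map_list visited → Spec_u_acq map_list visited (u_acq map_list visited)

-- ===== LEMMAS AND PROOFS =====
-- ============ proof layer chunk 1 ============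
def InR (p : Int × Int) : Prop := 0 ≤ p.1 ∧ p.1 < 5 ∧ 0 ≤ p.2 ∧ p.2 < 5

theorem mem_pvCells {p : Int × Int} : p ∈ pvCells ↔ InR p := by
  constructor
  · intro h
    rw [pvCells, List.mem_flatMap] at h
    obtain ⟨r, hr, h⟩ := h
    rw [List.mem_map] at h
    obtain ⟨c, hc, h⟩ := h
    rw [List.mem_range] at hr hc
    obtain ⟨a, b⟩ := p
    rw [Prod.ext_iff] at h
    simp only [InR]
    obtain ⟨h1, h2⟩ := h
    dsimp only at h1 h2
    constructor <;> [omega; constructor <;> [omega; constructor <;> omega]]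
  · intro h
    obtain ⟨h1, h2, h3, h4⟩ := h
    rw [pvCells, List.mem_flatMap]
    refine ⟨p.1.toNat, by rw [List.mem_range]; omega, ?_⟩
    rw [List.mem_map]
    refine ⟨p.2.toNat, by rw [List.mem_range]; omega, ?_⟩
    obtain ⟨a, b⟩ := p
    simp only [Prod.mk.injEq]
    constructor <;> simp <;> omega

theorem pvCells_nodup : pvCells.Nodup := by decide
theorem pvCells_length : pvCells.length = 25 := by decide

def StepR (m : List (List Int)) (v : Int) (p q : Int × Int) : Prop :=
  (∃ d ∈ pvDirs, q = (p.1 + d.1, p.2 + d.2)) ∧ InR q ∧ gI m q.1 q.2 = v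

def Reach (m : List (List Int)) (v : Int) (s p : Int × Int) : Prop :=
  Relation.ReflTransGen (StepR m v) s p

theorem dirs_neg {d : Int × Int} (h : d ∈ pvDirs) : (-d.1, -d.2) ∈ pvDirs := by
  fin_cases h <;> decide

theorem stepR_symm {m v} {p q : Int × Int} (h : StepR m v p q) (hp : InR p) (hv : gI m p.1 p.2 = v) :
    StepR m v q p := by
  obtain ⟨⟨d, hd, rfl⟩, _, _⟩ := h
  refine ⟨⟨(-d.1, -d.2), dirs_neg hd, ?_⟩, hp, hv⟩
  obtain ⟨a, b⟩ := p; simp only [Prod.mk.injEq]; constructor <;> ring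

theorem reach_good {m v} {s p : Int × Int} (hs : InR s) (hv : gI m s.1 s.2 = v)
    (h : Reach m v s p) : InR p ∧ gI m p.1 p.2 = v := by
  induction h with
  | refl => exact ⟨hs, hv⟩
  | tail _ h2 _ => exact ⟨h2.2.1, h2.2.2⟩

theorem reach_symm {m v} {s p : Int × Int} (hs : InR s) (hv : gI m s.1 s.2 = v)
    (h : Reach m v s p) : Reach m v p s := by
  induction h with
  | refl => exact .refl
  | tail h1 h2 ih =>
    have hg := reach_good hs hv h1
    exact .trans (.single (stepR_symm h2 hg.1 hg.2)) ih
-- ============ chunk 2: matrix kit ============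
def ent (m : List (List Bool)) (r c : Nat) : Bool := (m.getD r []).getD c false

def Shape5 (m : List (List Bool)) : Prop := 5 ≤ m.length ∧ ∀ r < 5, 5 ≤ (m.getD r []).length

theorem getD_eq_getElem' {α} (l : List α) (d : α) {n : Nat} (h : n < l.length) :
    l.getD n d = l[n] := by
  simp [List.getD, List.getElem?_eq_getElem h]

theorem length_sB (m : List (List Bool)) (y x : Int) (b : Bool) :
    (sB m y x b).length = m.length := by simp [sB]

theorem row_sB (m : List (List Bool)) (y x : Int) (b : Bool) (r : Nat) :
    (sB m y x b).getD r [] =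
      if r = y.toNat ∧ y.toNat < m.length then (m.getD y.toNat []).set x.toNat b
      else m.getD r [] := by
  simp only [sB, List.getD, List.getElem?_set]
  split_ifs with h1 h2 h3 h4
  · rfl
  · omega
  · omega
  · rw [List.getElem?_eq_none (by omega)]
  · omega
  · rfl

theorem rowlen_sB (m : List (List Bool)) (y x : Int) (b : Bool) (r : Nat) :
    ((sB m y x b).getD r []).length = (m.getD r []).length := by
  rw [row_sB]; split_ifs with h
  · rw [List.length_set, h.1]
  · rfl

theorem shape5_sB {m : List (List Bool)} (h : Shape5 m) (y x : Int) (b : Bool) :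
    Shape5 (sB m y x b) := by
  refine ⟨by rw [length_sB]; exact h.1, fun r hr => by rw [rowlen_sB]; exact h.2 r hr⟩

theorem ent_sB {m : List (List Bool)} {y x : Int} (b : Bool)
    (hy : y.toNat < m.length) (hx : x.toNat < (m.getD y.toNat []).length) (r c : Nat) :
    ent (sB m y x b) r c = if r = y.toNat ∧ c = x.toNat then b else ent m r c := by
  unfold ent
  rw [row_sB]
  by_cases hr : r = y.toNat
  · rw [if_pos ⟨hr, hy⟩, hr]
    by_cases hc : c = x.toNat
    · rw [if_pos ⟨rfl, hc⟩, hc]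
      simp only [List.getD] at hx ⊢
      simp only [List.getElem?_set, if_pos rfl]
      rw [if_pos hx]
      rfl
    · rw [if_neg (by tauto)]
      simp only [List.getD, List.getElem?_set]
      rw [if_neg (by omega)]
  · rw [if_neg (by tauto), if_neg (by tauto)]

theorem gB_sB {m : List (List Bool)} (hs : Shape5 m) {p q : Int × Int} (b : Bool)
    (hp : InR p) (hq : InR q) :
    gB (sB m p.1 p.2 b) q.1 q.2 = if q = p then b else gB m q.1 q.2 := by
  obtain ⟨hp1, hp2, hp3, hp4⟩ := hp
  obtain ⟨hq1, hq2, hq3, hq4⟩ := hq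
  have hy : p.1.toNat < m.length := by have := hs.1; omega
  have hx : p.2.toNat < (m.getD p.1.toNat []).length := by
    have := hs.2 p.1.toNat (by omega); omega
  show ent _ _ _ = _
  rw [ent_sB b hy hx]
  by_cases h : q = p
  · simp [h]
  · have hne : ¬(q.1.toNat = p.1.toNat ∧ q.2.toNat = p.2.toNat) := by
      rintro ⟨hc1, hc2⟩
      exact h (Prod.ext (by omega) (by omega))
    rw [if_neg hne, if_neg h]
    rfl

def Deriv (vis m : List (List Bool)) : Prop :=
  m.length = vis.length ∧ (∀ r : Nat, ((m.getD r []).length = (vis.getD r []).length)) ∧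
  (∀ r c : Nat, 5 ≤ r ∨ 5 ≤ c → ent m r c = ent vis r c)

theorem deriv_refl (vis : List (List Bool)) : Deriv vis vis := ⟨rfl, fun _ => rfl, fun _ _ _ => rfl⟩

theorem shape5_of_deriv {vis m : List (List Bool)} (hs : Shape5 vis) (hd : Deriv vis m) :
    Shape5 m := by
  refine ⟨by rw [hd.1]; exact hs.1, fun r hr => by rw [hd.2.1 r]; exact hs.2 r hr⟩

theorem deriv_sB {vis m : List (List Bool)} (hs : Shape5 vis) (hd : Deriv vis m)
    {p : Int × Int} (hp : InR p) (b : Bool) : Deriv vis (sB m p.1 p.2 b) := by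
  have hm := shape5_of_deriv hs hd
  obtain ⟨h1, h2, h3, h4⟩ := hp
  have hy : p.1.toNat < m.length := by have := hm.1; omega
  have hx : p.2.toNat < (m.getD p.1.toNat []).length := by
    have := hm.2 p.1.toNat (by omega); omega
  refine ⟨by rw [length_sB]; exact hd.1, fun r => by rw [rowlen_sB]; exact hd.2.1 r, ?_⟩
  intro r c hrc
  rw [ent_sB b hy hx]
  have : ¬(r = p.1.toNat ∧ c = p.2.toNat) := by omega
  rw [if_neg this]
  exact hd.2.2 r c hrc

theorem mat_ext {vis m1 m2 : List (List Bool)} (hs : Shape5 vis)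
    (h1 : Deriv vis m1) (h2 : Deriv vis m2)
    (hag : ∀ p : Int × Int, InR p → gB m1 p.1 p.2 = gB m2 p.1 p.2) : m1 = m2 := by
  have hlen : m1.length = m2.length := by rw [h1.1, h2.1]
  apply List.ext_getElem hlen
  intro n hn1 hn2
  have hrow : m1[n].length = m2[n].length := by
    have := (h1.2.1 n).trans (h2.2.1 n).symm
    rwa [getD_eq_getElem' _ _ hn1, getD_eq_getElem' _ _ hn2] at this
  apply List.ext_getElem hrow
  intro k hk1 hk2
  have e1 : ent m1 n k = m1[n][k] := by
    unfold ent; rw [getD_eq_getElem' _ _ hn1, getD_eq_getElem' _ _ hk1]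
  have e2 : ent m2 n k = m2[n][k] := by
    unfold ent; rw [getD_eq_getElem' _ _ hn2, getD_eq_getElem' _ _ hk2]
  rw [← e1, ← e2]
  by_cases hb : n < 5 ∧ k < 5
  · have := hag ((n : Int), (k : Int)) (by exact ⟨by omega, by omega, by omega, by omega⟩)
    simpa [gB, ent] using this
  · rw [h1.2.2 n k (by omega), h2.2.2 n k (by omega)]
-- ============ chunk 3: component layer ============
theorem nodup_subset_length {α} [DecidableEq α] {l1 l2 : List α} (h1 : l1.Nodup)
    (hs : l1 ⊆ l2) : l1.length ≤ l2.length := by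
  calc l1.length = l1.toFinset.card := (List.toFinset_card_of_nodup h1).symm
    _ ≤ l2.toFinset.card := Finset.card_le_card (fun x hx => by
        rw [List.mem_toFinset] at hx ⊢; exact hs hx)
    _ ≤ l2.length := l2.toFinset_card_le

theorem subset_of_nodup_length {α} [DecidableEq α] {l1 l2 : List α} (h1 : l1.Nodup)
    (h2 : l2.Nodup) (hs : l1 ⊆ l2) (hl : l2.length ≤ l1.length) : ∀ x ∈ l2, x ∈ l1 := by
  have he : l1.toFinset = l2.toFinset := by
    apply Finset.eq_of_subset_of_card_le
    · intro x hx; rw [List.mem_toFinset] at hx ⊢; exact hs hx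
    · rw [List.toFinset_card_of_nodup h1, List.toFinset_card_of_nodup h2]; exact hl
  intro x hx
  rw [← List.mem_toFinset, he, List.mem_toFinset]; exact hx

def GrowG (m : List (List Int)) (v : Int) (s : List (Int × Int)) : List (Int × Int) :=
  PySem.Set.ofList (compGrow m v s)

theorem compGrow_nodup (m : List (List Int)) (v : Int) (s : List (Int × Int)) :
    (compGrow m v s).Nodup := List.Nodup.filter _ pvCells_nodup

theorem growG_eq (m : List (List Int)) (v : Int) (s : List (Int × Int)) :
    GrowG m v s = compGrow m v s :=
  PySem.Set.ofList_eq_self_of_nodup _ (compGrow_nodup m v s)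

theorem mem_growG {m v s} {p : Int × Int} :
    p ∈ GrowG m v s ↔ p ∈ pvCells ∧ (p ∈ s ∨ (gI m p.1 p.2 = v ∧ ∃ d ∈ pvDirs, (p.1 + d.1, p.2 + d.2) ∈ s)) := by
  rw [growG_eq]
  simp [compGrow, List.mem_filter, List.any_eq_true, List.contains_iff_mem, beq_iff_eq]

def iterG (m : List (List Int)) (v : Int) : Nat → List (Int × Int) → List (Int × Int)
  | 0, s => s
  | n + 1, s => GrowG m v (iterG m v n s)

theorem compB_eq_iterG (m : List (List Int)) (r c : Int) :
    compB m r c = iterG m (gI m r c) 25 [(r, c)] := by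
  unfold compB
  have : ∀ (n : Nat) (s : List (Int × Int)),
      (List.range n).foldl (fun s _ => PySem.Set.ofList (compGrow m (gI m r c) s)) s =
        iterG m (gI m r c) n s := by
    intro n
    induction n with
    | zero => intro s; rfl
    | succ k ih => intro s; rw [List.range_succ, List.foldl_append, ih]; rfl
  exact this 25 _

def CompInv (m : List (List Int)) (v : Int) (c : Int × Int) (s : List (Int × Int)) : Prop :=
  c ∈ s ∧ s.Nodup ∧ (∀ p ∈ s, p ∈ pvCells) ∧ (∀ p ∈ s, Reach m v c p)

theorem growG_compinv {m v c s} (hc : c ∈ pvCells) (h : CompInv m v c s) :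
    CompInv m v c (GrowG m v s) := by
  obtain ⟨h1, h2, h3, h4⟩ := h
  refine ⟨mem_growG.2 ⟨hc, .inl h1⟩, by rw [growG_eq]; exact compGrow_nodup m v s,
    fun p hp => (mem_growG.1 hp).1, fun p hp => ?_⟩
  obtain ⟨hcell, hp⟩ := mem_growG.1 hp
  rcases hp with hp | ⟨hv, d, hd, hq⟩
  · exact h4 p hp
  · refine .tail (h4 _ hq) ⟨⟨(-d.1, -d.2), dirs_neg hd, ?_⟩, mem_pvCells.1 hcell, hv⟩
    obtain ⟨a, b⟩ := p; simp only [Prod.mk.injEq]; constructor <;> ring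

theorem growG_subset {m v s} (h3 : ∀ p ∈ s, p ∈ pvCells) : ∀ p ∈ s, p ∈ GrowG m v s :=
  fun p hp => mem_growG.2 ⟨h3 p hp, .inl hp⟩

def StableG (m : List (List Int)) (v : Int) (s : List (Int × Int)) : Prop :=
  ∀ p, p ∈ GrowG m v s ↔ p ∈ s

theorem growG_congr {m v} {s t : List (Int × Int)} (h : ∀ p, p ∈ s ↔ p ∈ t) :
    ∀ p, p ∈ GrowG m v s ↔ p ∈ GrowG m v t := by
  intro p
  rw [mem_growG, mem_growG]
  constructor <;> (rintro ⟨hc, hp | ⟨hv, d, hd, hq⟩⟩)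
  · exact ⟨hc, .inl ((h p).1 hp)⟩
  · exact ⟨hc, .inr ⟨hv, d, hd, (h _).1 hq⟩⟩
  · exact ⟨hc, .inl ((h p).2 hp)⟩
  · exact ⟨hc, .inr ⟨hv, d, hd, (h _).2 hq⟩⟩

theorem mem_iterG_stable {m v s} (hst : StableG m v s) (n : Nat) :
    ∀ p, p ∈ iterG m v n s ↔ p ∈ s := by
  induction n with
  | zero => intro p; rfl
  | succ k ih =>
    intro p
    show p ∈ GrowG m v (iterG m v k s) ↔ _
    rw [growG_congr ih p]
    exact hst p

theorem stable_iterG {m v s} (hst : StableG m v s) (n : Nat) : StableG m v (iterG m v n s) := by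
  intro p
  rw [growG_congr (mem_iterG_stable hst n) p, hst p]
  exact (mem_iterG_stable hst n p).symm

theorem iterG_swap (m : List (List Int)) (v : Int) (n : Nat) (s : List (Int × Int)) :
    iterG m v (n + 1) s = iterG m v n (GrowG m v s) := by
  induction n with
  | zero => rfl
  | succ k ih => show GrowG m v (iterG m v (k+1) s) = _; rw [ih]; rfl

theorem sat_lemma {m v c} (hc : c ∈ pvCells) :
    ∀ (n : Nat) (s : List (Int × Int)), CompInv m v c s → 25 ≤ n + s.length →
      StableG m v (iterG m v n s) := by
  intro n
  induction n with
  | zero =>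
    intro s hinv hlen
    obtain ⟨h1, h2, h3, h4⟩ := hinv
    have hall : ∀ p ∈ pvCells, p ∈ s := by
      apply subset_of_nodup_length h2 pvCells_nodup h3
      rw [pvCells_length]; simpa using hlen
    intro p
    exact ⟨fun hp => hall p (mem_growG.1 hp).1, fun hp => growG_subset h3 p hp⟩
  | succ k ih =>
    intro s hinv hlen
    by_cases hst : StableG m v s
    · exact stable_iterG hst (k + 1)
    · obtain ⟨x, hx⟩ : ∃ x, x ∈ GrowG m v s ∧ x ∉ s := by
        by_contra hno
        push_neg at hno
        exact hst (fun p => ⟨fun h => hno p h, growG_subset hinv.2.2.1 p⟩)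
      have hgrow : s.length + 1 ≤ (GrowG m v s).length := by
        have : (x :: s).Nodup := List.nodup_cons.2 ⟨hx.2, hinv.2.1⟩
        have hsub : (x :: s) ⊆ GrowG m v s := by
          intro y hy
          rcases List.mem_cons.1 hy with rfl | hy
          · exact hx.1
          · exact growG_subset hinv.2.2.1 y hy
        simpa using nodup_subset_length this hsub
      rw [iterG_swap]
      exact ih (GrowG m v s) (growG_compinv hc hinv) (by omega)

theorem compinv_iterG {m v c s} (hc : c ∈ pvCells) (h : CompInv m v c s) (n : Nat) :
    CompInv m v c (iterG m v n s) := by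
  induction n with
  | zero => exact h
  | succ k ih => exact growG_compinv hc ih

theorem compB_base {m : List (List Int)} {c : Int × Int} (hc : c ∈ pvCells) :
    CompInv m (gI m c.1 c.2) c [c] :=
  ⟨List.mem_singleton_self c, List.nodup_singleton c,
   fun p hp => by rwa [List.mem_singleton.1 hp],
   fun p hp => (List.mem_singleton.1 hp) ▸ Relation.ReflTransGen.refl⟩

theorem compB_inv {m : List (List Int)} {c : Int × Int} (hc : c ∈ pvCells) :
    CompInv m (gI m c.1 c.2) c (compB m c.1 c.2) := by
  rw [compB_eq_iterG]
  exact compinv_iterG hc (by simpa using compB_base hc) 25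

theorem compB_stable {m : List (List Int)} {c : Int × Int} (hc : c ∈ pvCells) :
    StableG m (gI m c.1 c.2) (compB m c.1 c.2) := by
  rw [compB_eq_iterG]
  exact sat_lemma hc 25 [c] (by simpa using compB_base hc) (by simp)

theorem mem_compB {m : List (List Int)} {c : Int × Int} (hc : c ∈ pvCells) (p : Int × Int) :
    p ∈ compB m c.1 c.2 ↔ Reach m (gI m c.1 c.2) c p := by
  constructor
  · exact fun hp => (compB_inv hc).2.2.2 p hp
  · intro hr
    induction hr with
    | refl => exact (compB_inv hc).1
    | tail h1 h2 ih =>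
      apply (compB_stable hc _).1
      obtain ⟨⟨d, hd, rfl⟩, hin, hv⟩ := h2
      apply mem_growG.2
      refine ⟨mem_pvCells.2 hin, .inr ⟨hv, (-d.1, -d.2), dirs_neg hd, ?_⟩⟩
      simpa using ih
-- ============ chunk 4: component algebra ============
theorem compB_canon (m : List (List Int)) (c : Int × Int) :
    ∃ f, compB m c.1 c.2 = pvCells.filter f := by
  rw [compB_eq_iterG]
  have h25 : iterG m (gI m c.1 c.2) 25 [(c.1, c.2)] =
      GrowG m (gI m c.1 c.2) (iterG m (gI m c.1 c.2) 24 [(c.1, c.2)]) := rfl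
  rw [h25, growG_eq]
  unfold compGrow
  exact ⟨_, rfl⟩

theorem compB_eq_of_mem_iff {m : List (List Int)} {c c' : Int × Int}
    (h : ∀ p, p ∈ compB m c.1 c.2 ↔ p ∈ compB m c'.1 c'.2) :
    compB m c.1 c.2 = compB m c'.1 c'.2 := by
  obtain ⟨f, hf⟩ := compB_canon m c
  obtain ⟨g, hg⟩ := compB_canon m c'
  rw [hf, hg] at h ⊢
  apply List.filter_congr
  intro p hp
  have := h p
  simp only [List.mem_filter, hp, true_and] at this
  cases hfp : f p <;> cases hgp : g p <;> simp [hfp, hgp] at this ⊢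

theorem self_mem_compB {m : List (List Int)} {c : Int × Int} (hc : c ∈ pvCells) :
    c ∈ compB m c.1 c.2 := (compB_inv hc).1

theorem compB_sub {m : List (List Int)} {c : Int × Int} (hc : c ∈ pvCells) :
    ∀ p ∈ compB m c.1 c.2, p ∈ pvCells := (compB_inv hc).2.2.1

theorem compB_eq_of_mem {m : List (List Int)} {c q : Int × Int} (hc : c ∈ pvCells)
    (hq : q ∈ compB m c.1 c.2) : compB m q.1 q.2 = compB m c.1 c.2 := by
  have hr : Reach m (gI m c.1 c.2) c q := (mem_compB hc q).1 hq
  have hgood := reach_good (mem_pvCells.1 hc) rfl hr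
  have hqc : q ∈ pvCells := mem_pvCells.2 hgood.1
  apply compB_eq_of_mem_iff
  intro p
  rw [mem_compB hqc p, mem_compB hc p, hgood.2]
  constructor
  · exact fun hpq => Relation.ReflTransGen.trans hr hpq
  · exact fun hcp => Relation.ReflTransGen.trans (reach_symm (mem_pvCells.1 hc) rfl hr) hcp

theorem mem_compB_comm {m : List (List Int)} {c q : Int × Int} (hc : c ∈ pvCells)
    (hq : q ∈ pvCells) : q ∈ compB m c.1 c.2 ↔ c ∈ compB m q.1 q.2 := by
  constructor
  · intro h; rw [compB_eq_of_mem hc h]; exact self_mem_compB hc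
  · intro h; rw [compB_eq_of_mem hq h]; exact self_mem_compB hq
-- ============ chunk 5: BFS (port A inner loop) ============
def trueCnt (vm : List (List Bool)) : Nat := (pvCells.filter (fun p => gB vm p.1 p.2)).length
def falseCnt (vm : List (List Bool)) : Nat := (pvCells.filter (fun p => !gB vm p.1 p.2)).length

theorem countP_update {l : List (Int × Int)} (hnd : l.Nodup) {p : Int × Int} (hp : p ∈ l)
    (f g : Int × Int → Bool) (hq : ∀ q ∈ l, q ≠ p → g q = f q) (hfp : f p = false)
    (hgp : g p = true) : (l.filter g).length = (l.filter f).length + 1 := by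
  induction l with
  | nil => cases hp
  | cons a l ih =>
    rw [List.nodup_cons] at hnd
    by_cases ha : a = p
    · subst ha
      have hfg : l.filter g = l.filter f :=
        List.filter_congr (fun q hql => hq q (List.mem_cons_of_mem a hql)
          (fun he => hnd.1 (he ▸ hql)))
      simp [List.filter_cons, hgp, hfp, hfg]
    · have hp' : p ∈ l := by
        rcases List.mem_cons.1 hp with h | h
        exacts [absurd h.symm ha, h]
      have hga : g a = f a := hq a List.mem_cons_self ha
      rw [List.filter_cons, List.filter_cons, hga]
      cases f a <;>
        simp [ih hnd.2 hp' (fun q hql hne => hq q (List.mem_cons_of_mem a hql) hne)]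

theorem trueCnt_sB {vm : List (List Bool)} {p : Int × Int} (hs : Shape5 vm) (hp : InR p)
    (hf : gB vm p.1 p.2 = false) : trueCnt (sB vm p.1 p.2 true) = trueCnt vm + 1 := by
  apply countP_update pvCells_nodup (mem_pvCells.2 hp)
  · intro q hql hne
    rw [gB_sB hs true hp (mem_pvCells.1 hql), if_neg hne]
  · exact hf
  · rw [gB_sB hs true hp hp, if_pos rfl]

theorem falseCnt_sB {vm : List (List Bool)} {p : Int × Int} (hs : Shape5 vm) (hp : InR p)
    (hf : gB vm p.1 p.2 = false) : falseCnt vm = falseCnt (sB vm p.1 p.2 true) + 1 := by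
  apply countP_update pvCells_nodup (mem_pvCells.2 hp)
  · intro q hql hne
    rw [gB_sB hs true hp (mem_pvCells.1 hql), if_neg hne]
  · rw [gB_sB hs true hp hp, if_pos rfl]; rfl
  · rw [hf]; rfl

theorem falseCnt_le (vm : List (List Bool)) : falseCnt vm ≤ 25 := by
  have h1 := List.length_filter_le (fun q => !gB vm q.1 q.2) pvCells
  have h2 := pvCells_length
  unfold falseCnt
  omega

theorem reach_InR {m v0} {s p : Int × Int} (h : Reach m v0 s p) : p = s ∨ InR p := by
  induction h with
  | refl => exact .inl rfl
  | tail _ h2 _ => exact .inr h2.2.1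

theorem pvDirs_getD_mem {ii : Nat} (h : ii < 4) : pvDirs.getD ii (0, 0) ∈ pvDirs := by
  interval_cases ii <;> decide

theorem pvDirs_mem_getD {d : Int × Int} (h : d ∈ pvDirs) :
    ∃ j, j < 4 ∧ pvDirs.getD j (0, 0) = d := by
  fin_cases h
  · exact ⟨0, by omega, rfl⟩
  · exact ⟨1, by omega, rfl⟩
  · exact ⟨2, by omega, rfl⟩
  · exact ⟨3, by omega, rfl⟩

theorem bfsStep_pos (m : List (List Int)) (v0 y x : Int)
    (st : List (Int × Int) × List (List Bool) × Int) (ii : Nat) (hii : ii < 4)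
    (hIn : InR (y + (pvDirs.getD ii (0, 0)).1, x + (pvDirs.getD ii (0, 0)).2))
    (hv : v0 = gI m (y + (pvDirs.getD ii (0, 0)).1) (x + (pvDirs.getD ii (0, 0)).2))
    (hg : gB st.2.1 (y + (pvDirs.getD ii (0, 0)).1) (x + (pvDirs.getD ii (0, 0)).2) = false) :
    bfsStep m v0 y x st ii =
      (st.1 ++ [(y + (pvDirs.getD ii (0, 0)).1, x + (pvDirs.getD ii (0, 0)).2)],
       sB st.2.1 (y + (pvDirs.getD ii (0, 0)).1) (x + (pvDirs.getD ii (0, 0)).2) true,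
       st.2.2 + 1) := by
  obtain ⟨h1, h2, h3, h4⟩ := hIn
  dsimp only at h1 h2 h3 h4
  interval_cases ii <;>
    (simp only [bfsStep, pvDy, pvDx, pvDirs, List.getD_cons_zero, List.getD_cons_succ] at h1 h2 h3 h4 hv hg ⊢
     rw [if_pos ⟨h1, h2, h3, h4, hv, hg⟩])

theorem bfsStep_neg (m : List (List Int)) (v0 y x : Int)
    (st : List (Int × Int) × List (List Bool) × Int) (ii : Nat) (hii : ii < 4)
    (hne : ¬(InR (y + (pvDirs.getD ii (0, 0)).1, x + (pvDirs.getD ii (0, 0)).2) ∧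
        v0 = gI m (y + (pvDirs.getD ii (0, 0)).1) (x + (pvDirs.getD ii (0, 0)).2) ∧
        gB st.2.1 (y + (pvDirs.getD ii (0, 0)).1) (x + (pvDirs.getD ii (0, 0)).2) = false)) :
    bfsStep m v0 y x st ii = st := by
  interval_cases ii <;>
    (simp only [bfsStep, pvDy, pvDx, pvDirs, List.getD_cons_zero, List.getD_cons_succ] at hne ⊢
     rw [if_neg (fun hc => hne ⟨⟨hc.1, hc.2.1, hc.2.2.1, hc.2.2.2.1⟩, hc.2.2.2.2.1, hc.2.2.2.2.2⟩)])
structure BInv (m : List (List Int)) (v0 : Int) (c : Int × Int) (qq : List (Int × Int))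
    (vm : List (List Bool)) (stack : Int) : Prop where
  shape : Shape5 vm
  seedIn : c ∈ pvCells
  seedT : gB vm c.1 c.2 = true
  qmem : ∀ p ∈ qq, InR p ∧ gB vm p.1 p.2 = true
  sound : ∀ p, InR p → gB vm p.1 p.2 = true → Reach m v0 c p
  closed : ∀ p, InR p → gB vm p.1 p.2 = true →
    p ∈ qq ∨ ∀ q, StepR m v0 p q → gB vm q.1 q.2 = true
  count : stack = (trueCnt vm : Int)

structure MInv (m : List (List Int)) (v0 : Int) (c yx : Int × Int) (done : Nat)
    (qq : List (Int × Int)) (vm : List (List Bool)) (stack : Int) : Prop where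
  shape : Shape5 vm
  seedIn : c ∈ pvCells
  seedT : gB vm c.1 c.2 = true
  self : InR yx ∧ gB vm yx.1 yx.2 = true
  qmem : ∀ p ∈ qq, InR p ∧ gB vm p.1 p.2 = true
  sound : ∀ p, InR p → gB vm p.1 p.2 = true → Reach m v0 c p
  closedM : ∀ p, InR p → gB vm p.1 p.2 = true →
    p = yx ∨ p ∈ qq ∨ ∀ q, StepR m v0 p q → gB vm q.1 q.2 = true
  handled : ∀ j, j < done → ∀ q : Int × Int,
    q = (yx.1 + (pvDirs.getD j (0, 0)).1, yx.2 + (pvDirs.getD j (0, 0)).2) →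
    StepR m v0 yx q → gB vm q.1 q.2 = true
  count : stack = (trueCnt vm : Int)

theorem gB_sB' {m : List (List Bool)} (hs : Shape5 m) {y x : Int} (b : Bool)
    (hyx : InR (y, x)) {q : Int × Int} (hq : InR q) :
    gB (sB m y x b) q.1 q.2 = if q = (y, x) then b else gB m q.1 q.2 :=
  gB_sB hs b hyx hq

theorem trueCnt_sB' {vm : List (List Bool)} {y x : Int} (hs : Shape5 vm) (hp : InR (y, x))
    (hf : gB vm y x = false) : trueCnt (sB vm y x true) = trueCnt vm + 1 :=
  trueCnt_sB hs hp hf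

theorem falseCnt_sB' {vm : List (List Bool)} {y x : Int} (hs : Shape5 vm) (hp : InR (y, x))
    (hf : gB vm y x = false) : falseCnt vm = falseCnt (sB vm y x true) + 1 :=
  falseCnt_sB hs hp hf

theorem minv_step {m v0} {c yx : Int × Int} {ii : Nat} (hii : ii < 4)
    {qq vm stack} (h : MInv m v0 c yx ii qq vm stack) :
    MInv m v0 c yx (ii + 1) (bfsStep m v0 yx.1 yx.2 (qq, vm, stack) ii).1
      (bfsStep m v0 yx.1 yx.2 (qq, vm, stack) ii).2.1
      (bfsStep m v0 yx.1 yx.2 (qq, vm, stack) ii).2.2 ∧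
    (bfsStep m v0 yx.1 yx.2 (qq, vm, stack) ii).1.length +
      2 * falseCnt (bfsStep m v0 yx.1 yx.2 (qq, vm, stack) ii).2.1 ≤
      qq.length + 2 * falseCnt vm := by
  by_cases hcond : InR (yx.1 + (pvDirs.getD ii (0, 0)).1, yx.2 + (pvDirs.getD ii (0, 0)).2) ∧
      v0 = gI m (yx.1 + (pvDirs.getD ii (0, 0)).1) (yx.2 + (pvDirs.getD ii (0, 0)).2) ∧
      gB vm (yx.1 + (pvDirs.getD ii (0, 0)).1) (yx.2 + (pvDirs.getD ii (0, 0)).2) = false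
  · obtain ⟨hIn, hv, hg⟩ := hcond
    rw [bfsStep_pos m v0 yx.1 yx.2 (qq, vm, stack) ii hii hIn hv hg]
    have hstep : StepR m v0 yx (yx.1 + (pvDirs.getD ii (0, 0)).1, yx.2 + (pvDirs.getD ii (0, 0)).2) :=
      ⟨⟨pvDirs.getD ii (0, 0), pvDirs_getD_mem hii, rfl⟩, hIn, hv.symm⟩
    have hgb := fun (q : Int × Int) (hq : InR q) => gB_sB' h.shape true hIn hq
    have hmono : ∀ q : Int × Int, InR q → gB vm q.1 q.2 = true →
        gB (sB vm (yx.1 + (pvDirs.getD ii (0, 0)).1) (yx.2 + (pvDirs.getD ii (0, 0)).2) true) q.1 q.2 = true := by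
      intro q hq hqt
      rw [hgb q hq]
      split_ifs <;> [rfl; exact hqt]
    refine ⟨⟨shape5_sB h.shape _ _ _, h.seedIn, ?_, ⟨h.self.1, hmono yx h.self.1 h.self.2⟩,
        ?_, ?_, ?_, ?_, ?_⟩, ?_⟩
    · exact hmono c (mem_pvCells.1 h.seedIn) h.seedT
    · intro p hp
      rcases List.mem_append.1 hp with hp | hp
      · obtain ⟨hin, ht⟩ := h.qmem p hp
        exact ⟨hin, hmono p hin ht⟩
      · rw [List.mem_singleton.1 hp]
        exact ⟨hIn, by rw [hgb _ hIn, if_pos rfl]⟩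
    · intro p hin ht
      rw [hgb p hin] at ht
      by_cases hpn : p = (yx.1 + (pvDirs.getD ii (0, 0)).1, yx.2 + (pvDirs.getD ii (0, 0)).2)
      · subst hpn
        exact Relation.ReflTransGen.tail (h.sound yx h.self.1 h.self.2) hstep
      · rw [if_neg hpn] at ht
        exact h.sound p hin ht
    · intro p hin ht
      rw [hgb p hin] at ht
      by_cases hpn : p = (yx.1 + (pvDirs.getD ii (0, 0)).1, yx.2 + (pvDirs.getD ii (0, 0)).2)
      · subst hpn
        exact .inr (.inl (List.mem_append.2 (.inr (List.mem_singleton_self _))))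
      · rw [if_neg hpn] at ht
        rcases h.closedM p hin ht with h1 | h1 | h1
        · exact .inl h1
        · exact .inr (.inl (List.mem_append.2 (.inl h1)))
        · exact .inr (.inr (fun q hq => hmono q hq.2.1 (h1 q hq)))
    · intro j hj q hqe hqs
      by_cases hqn : q = (yx.1 + (pvDirs.getD ii (0, 0)).1, yx.2 + (pvDirs.getD ii (0, 0)).2)
      · rw [hqn, hgb _ hIn, if_pos rfl]
      · have hj' : j < ii := by
          rcases Nat.lt_succ_iff_lt_or_eq.1 hj with h' | h'
          · exact h'
          · subst h'; exact absurd hqe hqn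
        exact hmono q hqs.2.1 (h.handled j hj' q hqe hqs)
    · rw [trueCnt_sB' h.shape hIn hg]
      push_cast
      rw [h.count]
    · have hfc := falseCnt_sB' h.shape hIn hg
      simp only [List.length_append, List.length_cons, List.length_nil]
      omega
  · rw [bfsStep_neg m v0 yx.1 yx.2 (qq, vm, stack) ii hii hcond]
    refine ⟨⟨h.shape, h.seedIn, h.seedT, h.self, h.qmem, h.sound, h.closedM, ?_, h.count⟩, le_refl _⟩
    intro j hj q hqe hqs
    rcases Nat.lt_succ_iff_lt_or_eq.1 hj with hj' | hj'
    · exact h.handled j hj' q hqe hqs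
    · subst hj'
      subst hqe
      rcases Bool.eq_false_or_eq_true (gB vm (yx.1 + (pvDirs.getD j (0, 0)).1)
          (yx.2 + (pvDirs.getD j (0, 0)).2)) with hb | hb
      · exact hb
      · exact absurd ⟨hqs.2.1, hqs.2.2.symm, hb⟩ hcond
set_option maxHeartbeats 2000000 in
theorem pop_lemma {m v0} {c : Int × Int} {y x : Int} {rest : List (Int × Int)}
    {vm : List (List Bool)} {stack : Int} (h : BInv m v0 c ((y, x) :: rest) vm stack) :
    BInv m v0 c ([0, 1, 2, 3].foldl (bfsStep m v0 y x) (rest, vm, stack)).1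
      ([0, 1, 2, 3].foldl (bfsStep m v0 y x) (rest, vm, stack)).2.1
      ([0, 1, 2, 3].foldl (bfsStep m v0 y x) (rest, vm, stack)).2.2 ∧
    ([0, 1, 2, 3].foldl (bfsStep m v0 y x) (rest, vm, stack)).1.length +
      2 * falseCnt ([0, 1, 2, 3].foldl (bfsStep m v0 y x) (rest, vm, stack)).2.1 + 1 ≤
      (rest.length + 1) + 2 * falseCnt vm := by
  have hself := h.qmem (y, x) List.mem_cons_self
  have m0 : MInv m v0 c (y, x) 0 rest vm stack :=
    ⟨h.shape, h.seedIn, h.seedT, hself, fun p hp => h.qmem p (List.mem_cons_of_mem _ hp),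
     h.sound,
     fun p hin ht => by
       rcases h.closed p hin ht with hq | hq
       · rcases List.mem_cons.1 hq with h1 | h1
         · exact .inl h1
         · exact .inr (.inl h1)
       · exact .inr (.inr hq),
     fun j hj => absurd hj (Nat.not_lt_zero j), h.count⟩
  obtain ⟨m1, e1⟩ := minv_step (by omega) m0
  obtain ⟨m2, e2⟩ := minv_step (by omega) m1
  obtain ⟨m3, e3⟩ := minv_step (by omega) m2
  obtain ⟨m4, e4⟩ := minv_step (by omega) m3
  refine ⟨⟨m4.shape, m4.seedIn, m4.seedT, m4.qmem, m4.sound, ?_, m4.count⟩, ?_⟩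
  · intro p hin ht
    rcases m4.closedM p hin ht with h1 | h1 | h1
    · subst h1
      refine .inr (fun q hq => ?_)
      obtain ⟨⟨d, hd, hqe⟩, -, -⟩ := id hq
      obtain ⟨j, hj, hdj⟩ := pvDirs_mem_getD hd
      exact m4.handled j hj q (by rw [hdj]; exact hqe) hq
    · exact .inl h1
    · exact .inr h1
  · simp only [Prod.mk.eta] at e1 e2 e3 e4
    norm_num at e1 e2 e3 e4
    simp only [List.foldl, List.length_cons] at e1 e2 e3 e4 ⊢
    omega

theorem bfs_main {m : List (List Int)} {v0 : Int} {c : Int × Int} :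
    ∀ (fuel : Nat) (qq : List (Int × Int)) (vm : List (List Bool)) (stack : Int),
      BInv m v0 c qq vm stack → qq.length + 2 * falseCnt vm < fuel →
      (bfsLoop m v0 fuel qq vm stack).1 = [] ∧
      Shape5 (bfsLoop m v0 fuel qq vm stack).2.1 ∧
      (∀ p, InR p → (gB (bfsLoop m v0 fuel qq vm stack).2.1 p.1 p.2 = true ↔ Reach m v0 c p)) ∧
      (bfsLoop m v0 fuel qq vm stack).2.2 = (trueCnt (bfsLoop m v0 fuel qq vm stack).2.1 : Int) := by
  intro fuel
  induction fuel with
  | zero => intro qq vm stack _ hlt; exact absurd hlt (by omega)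
  | succ f ih =>
    rintro (_ | ⟨⟨y, x⟩, rest⟩) vm stack hinv hlt
    · have hcompl : ∀ p, Reach m v0 c p → gB vm p.1 p.2 = true := by
        intro p hr
        induction hr with
        | refl => exact hinv.seedT
        | tail h1 h2 ih2 =>
          rename_i b q
          have hbIn : InR b := by
            rcases reach_InR h1 with rfl | hb
            · exact mem_pvCells.1 hinv.seedIn
            · exact hb
          rcases hinv.closed b hbIn ih2 with hq | hq
          · cases hq
          · exact hq q h2
      exact ⟨rfl, hinv.shape, fun p hp => ⟨hinv.sound p hp, hcompl p⟩, hinv.count⟩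
    · obtain ⟨hB, hm⟩ := pop_lemma hinv
      have hrec := ih _ _ _ hB (by simp only [List.length_cons] at hlt; omega)
      simpa only [bfsLoop] using hrec
-- ============ chunk 6: outer loop ============
def KC (m : List (List Int)) (p : Int × Int) : List (Int × Int) := compB m p.1 p.2

def markedL (m : List (List Int)) (vis : List (List Bool)) (L : List (Int × Int))
    (p : Int × Int) : Prop :=
  3 ≤ (KC m p).length ∧ ∃ e ∈ L, e ∈ KC m p ∧ gB vis e.1 e.2 = false

def wB (m : List (List Int)) (vis : List (List Bool)) (c : Int × Int) : Int :=
  if selB vis (KC m c) && (firstNewB vis (KC m c) == some c) then ((KC m c).length : Int) else 0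

theorem foldl_inv {α σ : Type} (big : List α) (step : σ → α → σ) (P : List α → σ → Prop)
    (hstep : ∀ L c R s, big = L ++ c :: R → P L s → P (L ++ [c]) (step s c)) :
    ∀ (R L : List α) (s : σ), big = L ++ R → P L s → P big (R.foldl step s) := by
  intro R
  induction R with
  | nil =>
    intro L s hb hP
    rw [List.foldl_nil]
    rw [List.append_nil] at hb
    rw [hb]
    exact hP
  | cons a R ih =>
    intro L s hb hP
    rw [List.foldl_cons]
    have := ih (L ++ [a]) (step s a) (by rw [List.append_assoc]; simpa using hb)
      (hstep L a R s hb hP)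
    exact this

theorem foldl_add_if {l : List (Int × Int)} (f : Int × Int → Int) (cond : Int × Int → Bool)
    (a : Int) :
    l.foldl (fun t p => if cond p = true then t + f p else t) a =
      a + (l.map (fun p => if cond p = true then f p else 0)).sum := by
  induction l generalizing a with
  | nil => simp
  | cons p l ih =>
    rw [List.foldl_cons, List.map_cons, List.sum_cons, ih]
    split_ifs <;> ring

theorem paint_spec {vis : List (List Bool)} (hs : Shape5 vis) (cond : Int × Int → Bool) :
    ∀ (l : List (Int × Int)), (∀ p ∈ l, p ∈ pvCells) →
    ∀ (acc : List (List Bool)), Deriv vis acc →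
      Deriv vis (l.foldl (fun mm p => if cond p = true then sB mm p.1 p.2 true else mm) acc) ∧
      (∀ q ∈ pvCells,
        gB (l.foldl (fun mm p => if cond p = true then sB mm p.1 p.2 true else mm) acc) q.1 q.2 =
          (gB acc q.1 q.2 || (decide (q ∈ l) && cond q))) := by
  intro l
  induction l with
  | nil => intro _ acc hacc; exact ⟨hacc, fun q _ => by simp⟩
  | cons p l ih =>
    intro hl acc hacc
    have hpIn : InR p := mem_pvCells.1 (hl p List.mem_cons_self)
    rw [List.foldl_cons]
    by_cases hc : cond p = true
    · rw [if_pos hc]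
      have hacc' : Deriv vis (sB acc p.1 p.2 true) := deriv_sB hs hacc hpIn true
      obtain ⟨hD, hE⟩ := ih (fun q hq => hl q (List.mem_cons_of_mem _ hq)) _ hacc'
      refine ⟨hD, fun q hq => ?_⟩
      rw [hE q hq]
      have : gB (sB acc p.1 p.2 true) q.1 q.2 = (gB acc q.1 q.2 || decide (q = p)) := by
        rw [show gB (sB acc p.1 p.2 true) q.1 q.2 =
            if q = (p.1, p.2) then true else gB acc q.1 q.2 from
          gB_sB' (shape5_of_deriv hs hacc) true (by rwa [Prod.mk.eta]) (mem_pvCells.1 hq)]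
        rw [Prod.mk.eta]
        by_cases hqp : q = p <;> simp [hqp]
      rw [this]
      by_cases hqp : q = p <;> by_cases hql : q ∈ l <;> simp [hqp, hql, hc] <;> simp [List.mem_cons, hqp, hql]
    · rw [if_neg hc]
      obtain ⟨hD, hE⟩ := ih (fun q hq => hl q (List.mem_cons_of_mem _ hq)) _ hacc
      refine ⟨hD, fun q hq => ?_⟩
      rw [hE q hq]
      by_cases hqp : q = p <;> by_cases hql : q ∈ l <;>
        simp [hqp, hql, List.mem_cons] <;> simp_all
theorem blank_shape : Shape5 (List.replicate 5 (List.replicate 5 false)) := by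
  constructor
  · simp
  · intro r hr
    rw [List.getD_eq_getElem?_getD, List.getElem?_replicate, if_pos hr]
    simp

theorem gB_blank (y x : Int) : gB (List.replicate 5 (List.replicate 5 false)) y x = false := by
  unfold gB
  have hrow : ∀ n : Nat, (([false, false, false, false, false] : List Bool)[n]?).getD false = false := by
    intro n
    rcases n with _ | _ | _ | _ | _ | n <;> rfl
  simp only [List.getD_eq_getElem?_getD, List.getElem?_replicate]
  split_ifs <;> simp [hrow]

theorem trueCnt_blank : trueCnt (List.replicate 5 (List.replicate 5 false)) = 0 := by
  unfold trueCnt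
  have hcg : ∀ p ∈ pvCells, (gB (List.replicate 5 (List.replicate 5 false)) p.1 p.2) = (fun _ : Int × Int => false) p :=
    fun p _ => by rw [gB_blank]
  rw [List.filter_congr hcg]
  simp

theorem bfsLoop_nil (m : List (List Int)) (v0 : Int) (fuel : Nat) (hf : fuel ≠ 0)
    (vm : List (List Bool)) (s : Int) : bfsLoop m v0 fuel [] vm s = ([], vm, s) := by
  cases fuel with
  | zero => exact absurd rfl hf
  | succ f => rfl

theorem markedL_congr_comp {m vis} {L : List (Int × Int)} {p c : Int × Int}
    (hp : p ∈ pvCells) (hcp : c ∈ KC m p) :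
    markedL m vis L p ↔ markedL m vis L c := by
  unfold markedL KC
  rw [compB_eq_of_mem hp hcp]

theorem markedL_mono {m vis} {L : List (Int × Int)} {c p : Int × Int}
    (h : markedL m vis L p) : markedL m vis (L ++ [c]) p := by
  obtain ⟨h1, e, he, h2⟩ := h
  exact ⟨h1, e, List.mem_append.2 (.inl he), h2⟩

theorem mark_update {m vis} {L : List (Int × Int)} {c : Int × Int} (hc : c ∈ pvCells)
    (hlen : 3 ≤ (KC m c).length) (hvc : gB vis c.1 c.2 = false) :
    ∀ p ∈ pvCells,
      ((gB vis p.1 p.2 = true ∨ markedL m vis L p) ∨ p ∈ KC m c) ↔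
        (gB vis p.1 p.2 = true ∨ markedL m vis (L ++ [c]) p) := by
  intro p hp
  constructor
  · rintro ((h | h) | h)
    · exact .inl h
    · exact .inr (markedL_mono h)
    · refine .inr ⟨?_, c, List.mem_append.2 (.inr (List.mem_singleton_self c)), ?_, hvc⟩
      · unfold KC
        rw [compB_eq_of_mem hc h]
        exact hlen
      · exact (mem_compB_comm hc hp).1 h
  · rintro (h | ⟨h1, e, he, h2, h3⟩)
    · exact .inl (.inl h)
    · rcases List.mem_append.1 he with he | he
      · exact .inl (.inr ⟨h1, e, he, h2, h3⟩)
      · rw [List.mem_singleton.1 he] at h2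
        exact .inr ((mem_compB_comm hc hp).2 h2)

theorem mark_skip_seen {m vis} {L : List (Int × Int)} {c : Int × Int} (hc : c ∈ pvCells)
    (hseen : gB vis c.1 c.2 = true ∨ markedL m vis L c) :
    ∀ p ∈ pvCells, (markedL m vis (L ++ [c]) p ↔ markedL m vis L p) := by
  intro p hp
  refine ⟨?_, markedL_mono⟩
  rintro ⟨h1, e, he, h2, h3⟩
  rcases List.mem_append.1 he with he | he
  · exact ⟨h1, e, he, h2, h3⟩
  · rw [List.mem_singleton.1 he] at h2 h3
    rcases hseen with hv | hm
    · simp [hv] at h3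
    · exact (markedL_congr_comp hp h2).2 hm

theorem mark_skip_small {m vis} {L : List (Int × Int)} {c : Int × Int} (hc : c ∈ pvCells)
    (hlen : (KC m c).length < 3) :
    ∀ p ∈ pvCells, (markedL m vis (L ++ [c]) p ↔ markedL m vis L p) := by
  intro p hp
  refine ⟨?_, markedL_mono⟩
  rintro ⟨h1, e, he, h2, h3⟩
  rcases List.mem_append.1 he with he | he
  · exact ⟨h1, e, he, h2, h3⟩
  · rw [List.mem_singleton.1 he] at h2
    exfalso
    have : KC m p = KC m c := (compB_eq_of_mem hp h2).symm
    rw [this] at h1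
    omega
theorem w_char {m vis} {L R : List (Int × Int)} {c : Int × Int}
    (hsplit : pvCells = L ++ c :: R) :
    wB m vis c = if (3 ≤ (KC m c).length ∧ gB vis c.1 c.2 = false ∧
        ∀ e ∈ L, ¬(e ∈ KC m c ∧ gB vis e.1 e.2 = false))
      then ((KC m c).length : Int) else 0 := by
  have hnd : (L ++ c :: R).Nodup := hsplit ▸ pvCells_nodup
  obtain ⟨hndL, hndCR, hdisj⟩ := List.nodup_append.1 hnd
  have hcL : c ∉ L := fun h => hdisj c h c List.mem_cons_self rfl
  have hcR : c ∉ R := (List.nodup_cons.1 hndCR).1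
  have hc : c ∈ pvCells := by rw [hsplit]; exact List.mem_append.2 (.inr List.mem_cons_self)
  have hself : c ∈ KC m c := self_mem_compB hc
  have hpred : ∀ e : Int × Int, (((KC m c).contains e && !gB vis e.1 e.2) = true) ↔
      (e ∈ KC m c ∧ gB vis e.1 e.2 = false) := by
    intro e
    simp [Bool.and_eq_true, Bool.not_eq_true']
  have hfind : firstNewB vis (KC m c) =
      ((List.find? (fun p => (KC m c).contains p && !gB vis p.1 p.2) L).or
        (List.find? (fun p => (KC m c).contains p && !gB vis p.1 p.2) (c :: R))) := by
    unfold firstNewB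
    rw [hsplit, List.find?_append]
  have hcond : (selB vis (KC m c) && (firstNewB vis (KC m c) == some c)) = true ↔
      (3 ≤ (KC m c).length ∧ gB vis c.1 c.2 = false ∧
        ∀ e ∈ L, ¬(e ∈ KC m c ∧ gB vis e.1 e.2 = false)) := by
    constructor
    · intro hb
      rw [Bool.and_eq_true] at hb
      obtain ⟨hsel, hfn⟩ := hb
      rw [selB, Bool.and_eq_true] at hsel
      obtain ⟨hlen, -⟩ := hsel
      have hfn' : firstNewB vis (KC m c) = some c := by
        have := (beq_iff_eq).1 hfn
        exact this
      rw [hfind] at hfn'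
      have hfl : List.find? (fun p => (KC m c).contains p && !gB vis p.1 p.2) L = none := by
        cases hx : List.find? (fun p => (KC m c).contains p && !gB vis p.1 p.2) L with
        | none => rfl
        | some e =>
          rw [hx, Option.some_or] at hfn'
          have he : e = c := by injection hfn'
          exact absurd (he ▸ List.mem_of_find?_eq_some hx) hcL
      rw [hfl, Option.none_or, List.find?_cons] at hfn'
      refine ⟨by simpa using hlen, ?_, ?_⟩
      · by_cases hpc : ((KC m c).contains c && !gB vis c.1 c.2) = true
        · exact ((hpred c).1 hpc).2
        · rw [Bool.not_eq_true] at hpc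
          rw [hpc] at hfn'
          exact absurd (List.mem_of_find?_eq_some hfn') hcR
      · intro e heL hcontra
        have := List.find?_eq_none.1 hfl e heL
        exact this ((hpred e).2 hcontra)
    · rintro ⟨h1, h2, h3⟩
      have hfl : List.find? (fun p => (KC m c).contains p && !gB vis p.1 p.2) L = none :=
        List.find?_eq_none.2 (fun e heL hpe => h3 e heL ((hpred e).1 hpe))
      have hpc : ((KC m c).contains c && !gB vis c.1 c.2) = true := (hpred c).2 ⟨hself, h2⟩
      rw [Bool.and_eq_true]
      constructor
      · unfold selB
        rw [Bool.and_eq_true]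
        refine ⟨by simpa using h1, ?_⟩
        apply List.any_eq_true.2
        exact ⟨c, hself, by simp [h2]⟩
      · rw [hfind, hfl, Option.none_or, List.find?_cons, hpc]
        simp
  by_cases hP : (3 ≤ (KC m c).length ∧ gB vis c.1 c.2 = false ∧
      ∀ e ∈ L, ¬(e ∈ KC m c ∧ gB vis e.1 e.2 = false))
  · rw [wB, if_pos (hcond.2 hP), if_pos hP]
  · rw [wB, if_neg (fun hb => hP (hcond.1 hb)), if_neg hP]
structure OInv (m : List (List Int)) (vis : List (List Bool)) (L : List (Int × Int))
    (st : List (Int × Int) × Int × List (List Bool)) : Prop where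
  qe : st.1 = []
  dv : Deriv vis st.2.2
  mark : ∀ p ∈ pvCells, (gB st.2.2 p.1 p.2 = true ↔
    (gB vis p.1 p.2 = true ∨ markedL m vis L p))
  ts : st.2.1 = (L.map (wB m vis)).sum

theorem markedFull_iff {m vis} {p : Int × Int} (hp : p ∈ pvCells) :
    markedL m vis pvCells p ↔ selB vis (KC m p) = true := by
  unfold selB
  rw [Bool.and_eq_true]
  constructor
  · rintro ⟨h1, e, he, h2, h3⟩
    exact ⟨by simpa using h1, List.any_eq_true.2 ⟨e, h2, by simp [h3]⟩⟩
  · rintro ⟨h1, h2⟩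
    obtain ⟨e, he, hv⟩ := List.any_eq_true.1 h2
    exact ⟨by simpa using h1, e, compB_sub hp e he, he, by simpa using hv⟩

set_option maxHeartbeats 4000000 in
theorem uOuter_spec {m : List (List Int)} {vis : List (List Bool)} (hs : Shape5 vis)
    (L : List (Int × Int)) (c : Int × Int) (R : List (Int × Int))
    (st : List (Int × Int) × Int × List (List Bool)) (hsplit : pvCells = L ++ c :: R)
    (h : OInv m vis L st) : OInv m vis (L ++ [c]) (uOuter m st c) := by
  obtain ⟨qq, ts, tv⟩ := st
  have hq0 : qq = [] := h.qe
  subst hq0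
  have hc : c ∈ pvCells := by rw [hsplit]; exact List.mem_append.2 (.inr List.mem_cons_self)
  have hcIn : InR c := mem_pvCells.1 hc
  have hcp : InR (c.1, c.2) := by rwa [Prod.mk.eta]
  have hts : ts = (List.map (wB m vis) L).sum := h.ts
  have htvshape : Shape5 tv := shape5_of_deriv hs h.dv
  have hv0shape : Shape5 (sB (List.replicate 5 (List.replicate 5 false)) c.1 c.2 true) :=
    shape5_sB blank_shape _ _ _
  have hv0 : ∀ q : Int × Int, InR q →
      gB (sB (List.replicate 5 (List.replicate 5 false)) c.1 c.2 true) q.1 q.2 =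
        if q = c then true else false := by
    intro q hq
    rw [gB_sB' blank_shape true hcp hq, Prod.mk.eta, gB_blank]
  show OInv m vis (L ++ [c])
    (let qq := if gB tv c.1 c.2 = false then ([] : List (Int × Int)) ++ [c] else []
     let v0 := sB (List.replicate 5 (List.replicate 5 false)) c.1 c.2 true
     let idx := gI m c.1 c.2
     let r := bfsLoop m idx 1000 qq v0 1
     if 3 ≤ r.2.2 then
       (r.1, ts + r.2.2,
         pvCells.foldl (fun tv q => if gB r.2.1 q.1 q.2 = true then sB tv q.1 q.2 true else tv) tv)
     else (r.1, ts, tv))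
  by_cases hseed : gB tv c.1 c.2 = false
  · -- seeded: run the BFS
    rw [if_pos hseed]
    have hnvis : ¬(gB vis c.1 c.2 = true ∨ markedL m vis L c) := by
      intro hcontra
      rw [← h.mark c hc] at hcontra
      rw [hseed] at hcontra
      cases hcontra
    have hvisc : gB vis c.1 c.2 = false := by
      cases hb : gB vis c.1 c.2
      · rfl
      · exact absurd (.inl hb) hnvis
    show OInv m vis (L ++ [c])
      (if 3 ≤ (bfsLoop m (gI m c.1 c.2) 1000 ([] ++ [c])
            (sB (List.replicate 5 (List.replicate 5 false)) c.1 c.2 true) 1).2.2 then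
        ((bfsLoop m (gI m c.1 c.2) 1000 ([] ++ [c])
            (sB (List.replicate 5 (List.replicate 5 false)) c.1 c.2 true) 1).1, ts +
          (bfsLoop m (gI m c.1 c.2) 1000 ([] ++ [c])
            (sB (List.replicate 5 (List.replicate 5 false)) c.1 c.2 true) 1).2.2,
          pvCells.foldl (fun tv q =>
            if gB (bfsLoop m (gI m c.1 c.2) 1000 ([] ++ [c])
                (sB (List.replicate 5 (List.replicate 5 false)) c.1 c.2 true) 1).2.1 q.1 q.2 = true
            then sB tv q.1 q.2 true else tv) tv)
       else ((bfsLoop m (gI m c.1 c.2) 1000 ([] ++ [c])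
            (sB (List.replicate 5 (List.replicate 5 false)) c.1 c.2 true) 1).1, ts, tv))
    set r := bfsLoop m (gI m c.1 c.2) 1000 ([] ++ [c])
      (sB (List.replicate 5 (List.replicate 5 false)) c.1 c.2 true) 1 with hrdef
    have hbinv : BInv m (gI m c.1 c.2) c ([] ++ [c])
        (sB (List.replicate 5 (List.replicate 5 false)) c.1 c.2 true) 1 := by
      refine ⟨hv0shape, hc, ?_, ?_, ?_, ?_, ?_⟩
      · rw [hv0 c hcIn, if_pos rfl]
      · intro p hp
        have hp' : p = c := by simpa using hp
        subst hp'
        exact ⟨hcIn, by rw [hv0 p hcIn, if_pos rfl]⟩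
      · intro p hpIn hpt
        rw [hv0 p hpIn] at hpt
        split_ifs at hpt with hpc
        subst hpc
        exact Relation.ReflTransGen.refl
      · intro p hpIn hpt
        rw [hv0 p hpIn] at hpt
        split_ifs at hpt with hpc
        subst hpc
        exact .inl (List.mem_append.2 (.inr List.mem_cons_self))
      · rw [trueCnt_sB' blank_shape hcp (gB_blank c.1 c.2), trueCnt_blank]
        norm_num
    have hmeas : ([] ++ [c] : List (Int × Int)).length + 2 *
        falseCnt (sB (List.replicate 5 (List.replicate 5 false)) c.1 c.2 true) < 1000 := by
      have := falseCnt_le (sB (List.replicate 5 (List.replicate 5 false)) c.1 c.2 true)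
      simp only [List.nil_append, List.length_cons, List.length_nil]
      omega
    obtain ⟨hre, hrs, hri, hrc⟩ := bfs_main 1000 _ _ _ hbinv hmeas
    rw [← hrdef] at hre hrs hri hrc
    have hKfilter : pvCells.filter (fun p => gB r.2.1 p.1 p.2) = KC m c := by
      obtain ⟨f, hf⟩ := compB_canon m c
      show _ = compB m c.1 c.2
      rw [hf]
      apply List.filter_congr
      intro p hp
      have h1 : (gB r.2.1 p.1 p.2 = true) ↔ Reach m (gI m c.1 c.2) c p :=
        hri p (mem_pvCells.1 hp)
      have h2 : (f p = true) ↔ Reach m (gI m c.1 c.2) c p := by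
        rw [← mem_compB hc p]
        constructor
        · intro hfp; rw [hf]; exact List.mem_filter.2 ⟨hp, hfp⟩
        · intro hmem; rw [hf] at hmem; exact (List.mem_filter.1 hmem).2
      have hiff := h1.trans h2.symm
      by_cases hg : gB r.2.1 p.1 p.2 = true
      · rw [hg, hiff.1 hg]
      · have hf' : ¬ f p = true := fun hfp => hg (hiff.2 hfp)
        rw [Bool.not_eq_true] at hg hf'
        rw [hg, hf']
    have hlenr : r.2.2 = ((KC m c).length : Int) := by
      rw [hrc]
      unfold trueCnt
      rw [hKfilter]
    by_cases hbig : (3 : Int) ≤ r.2.2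
    · rw [if_pos hbig]
      have hlen3 : 3 ≤ (KC m c).length := by
        rw [hlenr] at hbig
        exact_mod_cast hbig
      have hnoL : ∀ e ∈ L, ¬(e ∈ KC m c ∧ gB vis e.1 e.2 = false) :=
        fun e heL hcontra => hnvis (.inr ⟨hlen3, e, heL, hcontra⟩)
      obtain ⟨hD, hE⟩ := paint_spec hs (fun q => gB r.2.1 q.1 q.2) pvCells
        (fun p hp => hp) tv h.dv
      refine ⟨hre, hD, ?_, ?_⟩
      · intro p hp
        rw [hE p hp]
        have hmem : (gB r.2.1 p.1 p.2 = true) ↔ p ∈ KC m c :=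
          (hri p (mem_pvCells.1 hp)).trans (mem_compB hc p).symm
        rw [decide_eq_true hp, Bool.true_and, Bool.or_eq_true, h.mark p hp, hmem]
        exact mark_update hc hlen3 hvisc p hp
      · show ts + r.2.2 = ((L ++ [c]).map (wB m vis)).sum
        rw [List.map_append, List.sum_append, hts, hlenr]
        simp only [List.map_cons, List.map_nil, List.sum_cons, List.sum_nil, add_zero]
        rw [w_char hsplit, if_pos ⟨hlen3, hvisc, hnoL⟩]
    · rw [if_neg hbig]
      have hsmall : (KC m c).length < 3 := by
        by_contra hge
        push_neg at hge
        exact hbig (by rw [hlenr]; exact_mod_cast hge)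
      refine ⟨hre, h.dv, ?_, ?_⟩
      · intro p hp
        rw [show markedL m vis (L ++ [c]) p ↔ markedL m vis L p from
          mark_skip_small hc hsmall p hp]
        exact h.mark p hp
      · show ts = ((L ++ [c]).map (wB m vis)).sum
        rw [List.map_append, List.sum_append, hts]
        simp only [List.map_cons, List.map_nil, List.sum_cons, List.sum_nil, add_zero]
        rw [w_char hsplit, if_neg (fun hcond => by omega)]
        ring
  · -- not seeded: the queue stays empty, nothing happens
    rw [if_neg hseed]
    have htvc : gB tv c.1 c.2 = true := by
      cases hb : gB tv c.1 c.2
      · exact absurd hb hseed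
      · rfl
    have hseen : gB vis c.1 c.2 = true ∨ markedL m vis L c := (h.mark c hc).1 htvc
    show OInv m vis (L ++ [c])
      (if 3 ≤ (bfsLoop m (gI m c.1 c.2) 1000 []
            (sB (List.replicate 5 (List.replicate 5 false)) c.1 c.2 true) 1).2.2 then
        ((bfsLoop m (gI m c.1 c.2) 1000 []
            (sB (List.replicate 5 (List.replicate 5 false)) c.1 c.2 true) 1).1, ts +
          (bfsLoop m (gI m c.1 c.2) 1000 []
            (sB (List.replicate 5 (List.replicate 5 false)) c.1 c.2 true) 1).2.2,
          pvCells.foldl (fun tv q =>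
            if gB (bfsLoop m (gI m c.1 c.2) 1000 []
                (sB (List.replicate 5 (List.replicate 5 false)) c.1 c.2 true) 1).2.1 q.1 q.2 = true
            then sB tv q.1 q.2 true else tv) tv)
       else ((bfsLoop m (gI m c.1 c.2) 1000 []
            (sB (List.replicate 5 (List.replicate 5 false)) c.1 c.2 true) 1).1, ts, tv))
    rw [bfsLoop_nil m (gI m c.1 c.2) 1000 (by norm_num)]
    rw [if_neg (by norm_num)]
    refine ⟨rfl, h.dv, ?_, ?_⟩
    · intro p hp
      rw [show markedL m vis (L ++ [c]) p ↔ markedL m vis L p from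
        mark_skip_seen hc hseen p hp]
      exact h.mark p hp
    · show ts = ((L ++ [c]).map (wB m vis)).sum
      rw [List.map_append, List.sum_append, hts]
      simp only [List.map_cons, List.map_nil, List.sum_cons, List.sum_nil, add_zero]
      rw [w_char hsplit, if_neg ?hcond]
      · ring
      case hcond =>
        rintro ⟨h1, h2, h3⟩
        rcases hseen with hv | ⟨hl, e, heL, hekc, hev⟩
        · rw [hv] at h2; cases h2
        · exact h3 e heL ⟨hekc, hev⟩
-- ============ chunk 7: B-side normalization and the final theorem ============
theorem getD_map_range {α : Type} (f : Nat → α) (d : α) {n : Nat} (hn : n < 5) :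
    ((List.range 5).map f).getD n d = f n := by
  rw [List.getD_eq_getElem?_getD, List.getElem?_map, List.getElem?_range hn]
  rfl

theorem getCB_eq (m : List (List Int)) : ∀ p ∈ pvCells, getCB m p = KC m p := by
  intro p hp
  obtain ⟨h1, h2, h3, h4⟩ := mem_pvCells.1 hp
  have hr : p.1.toNat < 5 := by omega
  have hcn : p.2.toNat < 5 := by omega
  unfold getCB compsB
  rw [getD_map_range _ _ hr, getD_map_range _ _ hcn]
  unfold KC
  congr 1 <;> omega

theorem alt_eq (m : List (List Int)) (vis : List (List Bool)) :
    u_acq_alt m vis = ((pvCells.map (wB m vis)).sum,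
      pvCells.foldl (fun mm p => if selB vis (KC m p) = true then sB mm p.1 p.2 true else mm) vis) := by
  unfold u_acq_alt
  show (pvCells.foldl (fun (t : Int) p =>
      if selB vis (getCB m p) && (firstNewB vis (getCB m p) == some p)
      then t + ((getCB m p).length : Int) else t) 0,
    pvCells.foldl (fun mm p =>
      if selB vis (getCB m p) then sB mm p.1 p.2 true else mm) vis) = _
  have hfst : pvCells.foldl (fun (t : Int) p =>
      if selB vis (getCB m p) && (firstNewB vis (getCB m p) == some p)
      then t + ((getCB m p).length : Int) else t) 0 = (pvCells.map (wB m vis)).sum := by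
    rw [PySem.List.foldl_congr_mem pvCells _
      (fun (t : Int) p => if selB vis (KC m p) && (firstNewB vis (KC m p) == some p)
        then t + ((KC m p).length : Int) else t) 0
      (fun t p hp => by rw [getCB_eq m p hp])]
    rw [foldl_add_if (fun p => ((KC m p).length : Int))
      (fun p => selB vis (KC m p) && (firstNewB vis (KC m p) == some p)) 0]
    rw [zero_add]
    rfl
  have hsnd : pvCells.foldl (fun mm p =>
      if selB vis (getCB m p) then sB mm p.1 p.2 true else mm) vis =
    pvCells.foldl (fun mm p => if selB vis (KC m p) = true then sB mm p.1 p.2 true else mm) vis :=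
    PySem.List.foldl_congr_mem pvCells _ _ vis (fun mm p hp => by rw [getCB_eq m p hp])
  rw [hfst, hsnd]


set_option maxRecDepth 8000 in
set_option maxHeartbeats 2000000 in
theorem u_acq_main_thm : ∀ (map_list : List (List Int)) (visited : List (List Bool)),
    Pre_u_acq map_list visited → u_acq map_list visited = u_acq_alt map_list visited := by
  intro m vis hpre
  show ((pvCells.foldl (uOuter m) ([], 0, vis)).2.1,
    (pvCells.foldl (uOuter m) ([], 0, vis)).2.2) = u_acq_alt m vis
  obtain ⟨hm1, hm2, hv1, hv2⟩ := hpre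
  have hs : Shape5 vis := ⟨hv1, fun r hr => hv2 r (List.mem_range.2 hr)⟩
  have base : OInv m vis [] ([], 0, vis) := by
    refine ⟨rfl, deriv_refl vis, ?_, rfl⟩
    intro p hp
    constructor
    · exact fun h => .inl h
    · rintro (h | ⟨_, e, he, _⟩)
      · exact h
      · cases he
  have hfin : OInv m vis pvCells (pvCells.foldl (uOuter m) ([], 0, vis)) :=
    foldl_inv pvCells (uOuter m) (OInv m vis)
      (fun L c R s hsp hP => uOuter_spec hs L c R s hsp hP) pvCells [] ([], 0, vis) rfl base
  obtain ⟨hD2, hE2⟩ := paint_spec hs (fun p => selB vis (KC m p)) pvCells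
    (fun p hp => hp) vis (deriv_refl vis)
  have hmat : (pvCells.foldl (uOuter m) ([], 0, vis)).2.2 =
      pvCells.foldl (fun mm p => if selB vis (KC m p) = true then sB mm p.1 p.2 true else mm) vis := by
    apply mat_ext hs hfin.dv hD2
    intro p hpIn
    have hp : p ∈ pvCells := mem_pvCells.2 hpIn
    rw [hE2 p hp, decide_eq_true hp, Bool.true_and]
    have hiff : (gB (pvCells.foldl (uOuter m) ([], 0, vis)).2.2 p.1 p.2 = true) ↔
        ((gB vis p.1 p.2 || selB vis (KC m p)) = true) := by
      rw [Bool.or_eq_true, hfin.mark p hp, markedFull_iff hp]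
    by_cases hg : gB (pvCells.foldl (uOuter m) ([], 0, vis)).2.2 p.1 p.2 = true
    · rw [hg, (hiff.1 hg).symm]
    · have hng := hg
      rw [Bool.not_eq_true] at hng
      rw [hng]
      cases hb : (gB vis p.1 p.2 || selB vis (KC m p))
      · rfl
      · exact absurd (hiff.2 hb) hg
  rw [alt_eq, hfin.ts, hmat]

-- ===== VERDICT (by name: the statement is the Claim_ definition above) =====
theorem u_acq_spec : Claim_equal_u_acq := by
  intro map_list visited _ hpre
  exact u_acq_main_thm map_list visited hpre
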